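-- pv_equiv track=rewrite | github.com/donutloop/hackerrank | validating-uid.py | validateUID
-- ===== SOURCE A (Python) =====
-- def validateUID(s):
--
--     if len(s) != 10:
--         return False
--
--     upperCaseCount = 0
--     digitCount = 0
--     chars = dict()
--     for char in s:
--         if char in chars:
--             return False
--
--         if ord(char) >= 65 and ord(char) <= 90:
--             upperCaseCount = upperCaseCount + 1
--         elif ord(char) >= 97 and ord(char) <= 122:
--             pass
--         elif ord(char) >= 48 and ord(char) <= 57:
--             digitCount = digitCount + 1
--         else:
--
--             return False
--         chars[char] = True
--
--     return digitCount >= 3 and upperCaseCount >= 2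
-- ===== SOURCE B (Python) =====
-- def validateUID(s):
--     if len(s) != 10:
--         return False
--     if len(set(s)) != 10:
--         return False
--     if any(not ('0' <= c <= '9' or 'A' <= c <= 'Z' or 'a' <= c <= 'z') for c in s):
--         return False
--     upper = sum(1 for c in s if 'A' <= c <= 'Z')
--     digits = sum(1 for c in s if '0' <= c <= '9')
--     return digits >= 3 and upper >= 2
-- ===== Notes on version B (the rewrite author's own statement) =====
-- stated objective: simpler
-- what changed: Replaces A's single fused loop that threads a seen-chars dict and two counters with early returns by independent whole-string checks: a set-cardinality duplicate test, an all-alphanumeric pass, and two separate counting passes.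
import Mathlib
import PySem

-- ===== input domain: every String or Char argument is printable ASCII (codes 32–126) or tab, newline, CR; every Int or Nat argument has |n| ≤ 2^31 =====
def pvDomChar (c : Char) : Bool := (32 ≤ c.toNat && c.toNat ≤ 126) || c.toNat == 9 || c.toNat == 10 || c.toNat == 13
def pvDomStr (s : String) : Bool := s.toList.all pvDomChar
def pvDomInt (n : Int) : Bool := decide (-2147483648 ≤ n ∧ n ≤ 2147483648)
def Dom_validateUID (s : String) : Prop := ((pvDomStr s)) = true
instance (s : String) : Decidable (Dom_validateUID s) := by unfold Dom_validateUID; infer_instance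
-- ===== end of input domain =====

-- B replaces A's single fused loop (seen-chars dict + two counters + early returns) by
-- independent whole-string checks: set-cardinality duplicate test, an all-alphanumeric
-- pass, and two separate counting passes (objective: simpler).

-- ===== PORT A =====
-- the 'for char in s' loop of A: state = (upperCaseCount, digitCount, chars); early 'return False' = result false
def validateUIDLoop : List Char → Int → Int → PySem.Dict Char Bool → Bool
  | [], upperCaseCount, digitCount, _ => decide (3 ≤ digitCount) && decide (2 ≤ upperCaseCount)
  | char :: rest, upperCaseCount, digitCount, chars =>
    if chars.contains char then false
    else if 65 ≤ char.toNat && char.toNat ≤ 90 then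
      validateUIDLoop rest (upperCaseCount + 1) digitCount (chars.insert char true)
    else if 97 ≤ char.toNat && char.toNat ≤ 122 then
      validateUIDLoop rest upperCaseCount digitCount (chars.insert char true)
    else if 48 ≤ char.toNat && char.toNat ≤ 57 then
      validateUIDLoop rest upperCaseCount (digitCount + 1) (chars.insert char true)
    else false

def validateUID (s : String) : Bool :=
  if s.toList.length ≠ 10 then false
  else validateUIDLoop s.toList 0 0 PySem.Dict.empty

-- ===== PORT B =====
def isUidAlnum (c : Char) : Bool :=
  ('0' ≤ c && c ≤ '9') || ('A' ≤ c && c ≤ 'Z') || ('a' ≤ c && c ≤ 'z')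

def validateUID_alt (s : String) : Bool :=
  let l := s.toList
  if l.length ≠ 10 then false
  else if (PySem.Set.ofList l).length ≠ 10 then false
  else if l.any (fun c => !(isUidAlnum c)) then false
  else
    let upper : Int := ((l.filter (fun c => 'A' ≤ c && c ≤ 'Z')).length : Int)
    let digits : Int := ((l.filter (fun c => '0' ≤ c && c ≤ '9')).length : Int)
    decide (3 ≤ digits) && decide (2 ≤ upper)

-- ===== PRECONDITION & SPEC =====
def Spec_validateUID (s : String) (out : Bool) : Prop := out = validateUID_alt s
instance (s : String) (out : Bool) : Decidable (Spec_validateUID s out) := by unfold Spec_validateUID; infer_instance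

-- ===== CLAIM (what is proved, stated in full; the proofs are below) =====
def Claim_equal_validateUID : Prop := ∀ (s : String), Dom_validateUID s → Spec_validateUID s (validateUID s)

-- ===== LEMMAS AND PROOFS =====
theorem char_le_iff (a b : Char) : (a ≤ b) ↔ (a.toNat ≤ b.toNat) := by
  rw [Char.le_def, UInt32.le_iff_toNat_le]; rfl

theorem isUp_eq (c : Char) : (65 ≤ c.toNat && c.toNat ≤ 90) = ('A' ≤ c && c ≤ 'Z') := by
  simp [char_le_iff]

theorem isDig_eq (c : Char) : (48 ≤ c.toNat && c.toNat ≤ 57) = ('0' ≤ c && c ≤ '9') := by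
  simp [char_le_iff]

theorem isLow_eq (c : Char) : (97 ≤ c.toNat && c.toNat ≤ 122) = ('a' ≤ c && c ≤ 'z') := by
  simp [char_le_iff]

theorem ofList_length_lt (l : List Char) (h : ¬ l.Nodup) :
    (PySem.Set.ofList l).length < l.length := by
  induction l with
  | nil => simp at h
  | cons x xs ih =>
    rw [PySem.Set.ofList_cons]
    rw [List.nodup_cons, not_and_or] at h
    have hle := PySem.Set.length_ofList_le xs
    rcases h with hx | hnd
    · push Not at hx
      have hx' : x ∈ PySem.Set.ofList xs := (PySem.Set.mem_ofList xs x).mpr hx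
      have : ((PySem.Set.ofList xs).discard x).length < (PySem.Set.ofList xs).length := by
        unfold PySem.Set.discard
        exact List.length_filter_lt_length_iff_exists.mpr ⟨x, hx', by simp⟩
      simp only [List.length_cons]
      omega
    · have h1 := ih hnd
      have h2 : ((PySem.Set.ofList xs).discard x).length ≤ (PySem.Set.ofList xs).length :=
        List.length_filter_le _ _
      simp only [List.length_cons]
      omega

theorem ofList_length_eq_iff (l : List Char) :
    (PySem.Set.ofList l).length = l.length ↔ l.Nodup := by
  constructor
  · intro h
    by_contra hnd
    exact absurd h (Nat.ne_of_lt (ofList_length_lt l hnd))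
  · intro h; rw [PySem.Set.ofList_eq_self_of_nodup _ h]

theorem loop_true_iff (l : List Char) (u d : Int) (chars : PySem.Dict Char Bool) :
    validateUIDLoop l u d chars = true ↔
      ((∀ c ∈ l, chars.contains c = false) ∧ l.Nodup ∧ (∀ c ∈ l, isUidAlnum c = true)
        ∧ 3 ≤ d + ((l.filter (fun c => '0' ≤ c && c ≤ '9')).length : Int)
        ∧ 2 ≤ u + ((l.filter (fun c => 'A' ≤ c && c ≤ 'Z')).length : Int)) := by
  induction l generalizing u d chars with
  | nil => simp [validateUIDLoop]
  | cons char rest ih =>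
    rw [validateUIDLoop, isUp_eq, isLow_eq, isDig_eq]
    by_cases hc : chars.contains char = true
    · simp only [hc, if_true]
      constructor
      · intro h; exact absurd h (by simp)
      · rintro ⟨hall, -⟩
        exact absurd (hall char (by simp)) (by simp [hc])
    · rw [Bool.not_eq_true] at hc
      have hins : ∀ c ∈ rest, ((chars.insert char true).contains c = false)
          ↔ (¬ c = char ∧ chars.contains c = false) := by
        intro c _
        rw [PySem.Dict.contains_insert]
        simp
      by_cases hu : ('A' ≤ char && char ≤ 'Z') = true
      · have hnd : ('0' ≤ char && char ≤ '9') = false := by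
          revert hu; simp [char_le_iff]
          intro h1 h2
          have : ('9').toNat < ('A').toNat := by decide
          omega
        simp only [hc, hu, Bool.false_eq_true, if_false, if_true, ih]
        constructor
        · rintro ⟨hall, hnod, haln, hd, hup⟩
          refine ⟨?_, ?_, ?_, ?_, ?_⟩
          · intro c hcm
            rcases List.mem_cons.mp hcm with rfl | hm
            · exact hc
            · exact ((hins c hm).mp (hall c hm)).2
          · rw [List.nodup_cons]
            exact ⟨fun hmem => ((hins char hmem).mp (hall char hmem)).1 rfl, hnod⟩
          · intro c hcm
            rcases List.mem_cons.mp hcm with rfl | hm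
            · simp [isUidAlnum, hu]
            · exact haln c hm
          · simpa [List.filter_cons, hnd] using hd
          · simp only [List.filter_cons, hu, if_true, List.length_cons] at *
            push_cast at *
            omega
        · rintro ⟨hall, hnod, haln, hd, hup⟩
          rw [List.nodup_cons] at hnod
          refine ⟨?_, hnod.2, fun c hm => haln c (by simp [hm]), ?_, ?_⟩
          · intro c hm
            exact (hins c hm).mpr ⟨fun he => hnod.1 (he ▸ hm), hall c (by simp [hm])⟩
          · simpa [List.filter_cons, hnd] using hd
          · simp only [List.filter_cons, hu, if_true, List.length_cons] at hup
            push_cast at *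
            omega
      · by_cases hl : ('a' ≤ char && char ≤ 'z') = true
        · simp only [hc, hu, hl, Bool.false_eq_true, if_false, if_true, ih]
          have hnd : ('0' ≤ char && char ≤ '9') = false := by
            revert hl; simp [char_le_iff]
            intro h1 h2
            have : ('9').toNat < ('a').toNat := by decide
            omega
          constructor
          · rintro ⟨hall, hnod, haln, hd, hup⟩
            refine ⟨?_, ?_, ?_, ?_, ?_⟩
            · intro c hcm
              rcases List.mem_cons.mp hcm with rfl | hm
              · exact hc
              · exact ((hins c hm).mp (hall c hm)).2
            · rw [List.nodup_cons]
              exact ⟨fun hmem => ((hins char hmem).mp (hall char hmem)).1 rfl, hnod⟩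
            · intro c hcm
              rcases List.mem_cons.mp hcm with rfl | hm
              · simp [isUidAlnum, hl]
              · exact haln c hm
            · simpa [List.filter_cons, hnd] using hd
            · simpa [List.filter_cons, hu] using hup
          · rintro ⟨hall, hnod, haln, hd, hup⟩
            rw [List.nodup_cons] at hnod
            refine ⟨?_, hnod.2, fun c hm => haln c (by simp [hm]), ?_, ?_⟩
            · intro c hm
              exact (hins c hm).mpr ⟨fun he => hnod.1 (he ▸ hm), hall c (by simp [hm])⟩
            · simpa [List.filter_cons, hnd] using hd
            · simpa [List.filter_cons, hu] using hup
        · by_cases hdg : ('0' ≤ char && char ≤ '9') = true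
          · simp only [hc, hu, hl, hdg, Bool.false_eq_true, if_false, if_true, ih]
            constructor
            · rintro ⟨hall, hnod, haln, hd, hup⟩
              refine ⟨?_, ?_, ?_, ?_, ?_⟩
              · intro c hcm
                rcases List.mem_cons.mp hcm with rfl | hm
                · exact hc
                · exact ((hins c hm).mp (hall c hm)).2
              · rw [List.nodup_cons]
                exact ⟨fun hmem => ((hins char hmem).mp (hall char hmem)).1 rfl, hnod⟩
              · intro c hcm
                rcases List.mem_cons.mp hcm with rfl | hm
                · simp [isUidAlnum, hdg]
                · exact haln c hm
              · simp only [List.filter_cons, hdg, if_true, List.length_cons] at *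
                push_cast at *
                omega
              · simpa [List.filter_cons, hu] using hup
            · rintro ⟨hall, hnod, haln, hd, hup⟩
              rw [List.nodup_cons] at hnod
              refine ⟨?_, hnod.2, fun c hm => haln c (by simp [hm]), ?_, ?_⟩
              · intro c hm
                exact (hins c hm).mpr ⟨fun he => hnod.1 (he ▸ hm), hall c (by simp [hm])⟩
              · simp only [List.filter_cons, hdg, if_true, List.length_cons] at hd
                push_cast at *
                omega
              · simpa [List.filter_cons, hu] using hup
          · simp only [hc, hu, hl, hdg, Bool.false_eq_true, if_false]
            constructor
            · intro h; exact absurd h (by simp)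
            · rintro ⟨-, -, haln, -⟩
              have := haln char (by simp)
              rw [isUidAlnum] at this
              simp [hu, hl, hdg] at this

-- ===== VERDICT (by name: the statement is the Claim_ definition above) =====
theorem validateUID_spec : Claim_equal_validateUID := by
  intro s _
  unfold Spec_validateUID validateUID validateUID_alt
  set l := s.toList with hl
  by_cases hlen : l.length = 10
  · simp only [hlen, ne_eq, not_true_eq_false, if_false]
    by_cases hnod : l.Nodup
    · have hset : (PySem.Set.ofList l).length = 10 := by
        rw [← hlen]; exact (ofList_length_eq_iff l).mpr hnod
      by_cases haln : ∀ c ∈ l, isUidAlnum c = true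
      · have hany : (l.any fun c => !(isUidAlnum c)) = false := by
          simp [List.any_eq_false]; exact haln
        simp only [hset, hany, not_true_eq_false, if_false, Bool.false_eq_true]
        rw [Bool.eq_iff_iff, loop_true_iff]
        constructor
        · rintro ⟨-, -, -, hd, hup⟩
          simp only [Bool.and_eq_true, decide_eq_true_eq]
          constructor <;> [skip; skip] <;> omega
        · intro h
          simp only [Bool.and_eq_true, decide_eq_true_eq] at h
          exact ⟨fun c _ => PySem.Dict.contains_empty c, hnod, haln, by omega, by omega⟩
      · have hany : (l.any fun c => !(isUidAlnum c)) = true := by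
          simp only [List.any_eq_true]
          push Not at haln
          obtain ⟨c, hm, hcn⟩ := haln
          exact ⟨c, hm, by simp [hcn]⟩
        simp only [hset, hany, not_true_eq_false, if_false, if_true]
        rw [Bool.eq_iff_iff, loop_true_iff]
        simp only [Bool.false_eq_true, iff_false]
        rintro ⟨-, -, h3, -⟩
        push Not at haln
        obtain ⟨c, hm, hcn⟩ := haln
        exact hcn (h3 c hm)
    · have hset : ¬ (PySem.Set.ofList l).length = 10 := by
        have := ofList_length_lt l hnod
        omega
      simp only [hset, not_false_eq_true, if_true]
      rw [Bool.eq_iff_iff, loop_true_iff]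
      simp only [Bool.false_eq_true, iff_false]
      rintro ⟨-, h2, -⟩
      exact hnod h2
  · simp [hlen]
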